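-- pv_equiv track=rewrite | github.com/katiemkowal/pac_isl_maps | stations/helper_functions.py | collapse_list
-- ===== SOURCE A (Python) =====
-- def collapse_list(states, maxmin):
--     state_max_values = {}
--
--     # Iterate through the list of tuples
--     for state, value in states:
--         # Update the dictionary with the maximum value for each state
--         if maxmin == 'max':
--             if state not in state_max_values or value > state_max_values[state]:
--                 state_max_values[state] = value
--         elif maxmin == 'min':
--              if state not in state_max_values or value < state_max_values[state]:
--                 state_max_values[state] = value
--
--     # Convert the dictionary back into a list of tuples
--     collapsed_list = list(state_max_values.items())
--     return collapsed_list
-- ===== SOURCE B (Python) =====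
-- def collapse_list(states, maxmin):
--     # Group values per state in first-occurrence order, then reduce each
--     # group with max()/min() in a second pass; any other maxmin yields [].
--     groups = {}
--     for state, value in states:
--         groups.setdefault(state, []).append(value)
--     if maxmin == 'max':
--         return [(s, max(vs)) for s, vs in groups.items()]
--     if maxmin == 'min':
--         return [(s, min(vs)) for s, vs in groups.items()]
--     return []
-- ===== Notes on version B (the rewrite author's own statement) =====
-- stated objective: alternative
-- what changed: Replaces the fused loop that keeps a running extremum per state with a two-phase decomposition: one grouping pass building {state: [values]} and a second pass reducing each group with built-in max()/min().
import Mathlib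
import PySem

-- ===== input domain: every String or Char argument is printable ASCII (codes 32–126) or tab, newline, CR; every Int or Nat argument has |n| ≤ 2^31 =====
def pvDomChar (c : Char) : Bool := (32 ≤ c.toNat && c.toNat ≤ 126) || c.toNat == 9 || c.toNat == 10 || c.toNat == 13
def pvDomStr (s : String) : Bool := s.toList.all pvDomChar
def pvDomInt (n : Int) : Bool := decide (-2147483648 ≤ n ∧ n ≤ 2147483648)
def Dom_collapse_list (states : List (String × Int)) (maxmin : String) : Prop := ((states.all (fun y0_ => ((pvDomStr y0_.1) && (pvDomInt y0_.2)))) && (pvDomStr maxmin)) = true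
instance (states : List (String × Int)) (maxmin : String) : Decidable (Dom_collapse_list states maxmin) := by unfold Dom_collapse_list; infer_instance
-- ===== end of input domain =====

-- B replaces A's fused running-extremum loop by a grouping pass plus a second
-- reducing pass with max()/min() (objective: alternative decomposition, same cost).

-- ===== PORT A =====
-- loop body of A's single for-loop, as a named helper
def collapse_step (maxmin : String) (d : PySem.Dict String Int) (p : String × Int) :
    PySem.Dict String Int :=
  if maxmin == "max" then
    if !(d.contains p.1) || decide (((d.get? p.1).getD p.2) < p.2) then d.insert p.1 p.2 else d
  else if maxmin == "min" then
    if !(d.contains p.1) || decide (p.2 < ((d.get? p.1).getD p.2)) then d.insert p.1 p.2 else d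
  else d

def collapse_list (states : List (String × Int)) (maxmin : String) : List (String × Int) :=
  let state_max_values := states.foldl (collapse_step maxmin) PySem.Dict.empty
  state_max_values.items

-- ===== PORT B =====
def collapse_list_alt (states : List (String × Int)) (maxmin : String) : List (String × Int) :=
  let groups := states.foldl (fun d p => d.modify p.1 [] (fun vs => vs ++ [p.2])) PySem.Dict.empty
  if maxmin == "max" then
    groups.items.map (fun p => (p.1, (PySem.List.max? p.2 (fun v => v)).getD 0))
  else if maxmin == "min" then
    groups.items.map (fun p => (p.1, (PySem.List.min? p.2 (fun v => v)).getD 0))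
  else []

-- ===== PRECONDITION & SPEC =====
def Spec_collapse_list (states : List (String × Int)) (maxmin : String) (out : List (String × Int)) : Prop := out = collapse_list_alt states maxmin
instance (states : List (String × Int)) (maxmin : String) (out : List (String × Int)) : Decidable (Spec_collapse_list states maxmin out) := by unfold Spec_collapse_list; infer_instance

-- ===== CLAIM (what is proved, stated in full; the proofs are below) =====
def Claim_equal_collapse_list : Prop := ∀ (states : List (String × Int)) (maxmin : String), Dom_collapse_list states maxmin → Spec_collapse_list states maxmin (collapse_list states maxmin)

-- ===== LEMMAS AND PROOFS =====

-- running extremum of A's loop, per key, expressed as a fold over the values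
def combineRun (lt : Int → Int → Bool) : Option Int → List Int → Option Int
  | o, [] => o
  | o, v :: vs =>
    combineRun lt (some (match o with | none => v | some w => if lt w v then v else w)) vs

theorem collapse_step_max (d : PySem.Dict String Int) (p : String × Int) :
    collapse_step "max" d p =
      if !(d.contains p.1) || decide (((d.get? p.1).getD p.2) < p.2) then d.insert p.1 p.2 else d := by
  simp [collapse_step]

theorem collapse_step_min (d : PySem.Dict String Int) (p : String × Int) :
    collapse_step "min" d p =
      if !(d.contains p.1) || decide (p.2 < ((d.get? p.1).getD p.2)) then d.insert p.1 p.2 else d := by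
  simp [collapse_step]

theorem foldl_stepMax_get? (states : List (String × Int)) (d : PySem.Dict String Int) (k : String) :
    (states.foldl (collapse_step "max") d).get? k =
      combineRun (fun w v => decide (w < v)) (d.get? k)
        ((states.filter (fun p => p.1 == k)).map (·.2)) := by
  induction states generalizing d with
  | nil => simp [combineRun]
  | cons p rest ih =>
    obtain ⟨s, v⟩ := p
    rw [List.foldl_cons, ih]
    by_cases hk : s = k
    · subst hk
      simp only [List.filter_cons, beq_self_eq_true, if_pos, List.map_cons, combineRun]
      congr 1
      rw [collapse_step_max]
      rcases hg : d.get? s with _ | w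
      · have hc : d.contains s = false := by
          rw [PySem.Dict.contains_eq_isSome_get?, hg]; rfl
        simp [hc, PySem.Dict.get?_insert_self]
      · have hc : d.contains s = true := by
          rw [PySem.Dict.contains_eq_isSome_get?, hg]; rfl
        simp only [hc, Bool.not_true, Bool.false_or, Option.getD_some]
        by_cases hlt : w < v
        · simp [hlt, PySem.Dict.get?_insert_self]
        · simp [hlt, hg]
    · have hb : (s == k) = false := beq_eq_false_iff_ne.mpr hk
      simp only [List.filter_cons, hb, Bool.false_eq_true, if_false]
      congr 1
      rw [collapse_step_max]
      split
      · exact PySem.Dict.get?_insert_of_ne _ _ (fun h => hk h.symm)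
      · rfl

theorem foldl_stepMin_get? (states : List (String × Int)) (d : PySem.Dict String Int) (k : String) :
    (states.foldl (collapse_step "min") d).get? k =
      combineRun (fun w v => decide (v < w)) (d.get? k)
        ((states.filter (fun p => p.1 == k)).map (·.2)) := by
  induction states generalizing d with
  | nil => simp [combineRun]
  | cons p rest ih =>
    obtain ⟨s, v⟩ := p
    rw [List.foldl_cons, ih]
    by_cases hk : s = k
    · subst hk
      simp only [List.filter_cons, beq_self_eq_true, if_pos, List.map_cons, combineRun]
      congr 1
      rw [collapse_step_min]
      rcases hg : d.get? s with _ | w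
      · have hc : d.contains s = false := by
          rw [PySem.Dict.contains_eq_isSome_get?, hg]; rfl
        simp [hc, PySem.Dict.get?_insert_self]
      · have hc : d.contains s = true := by
          rw [PySem.Dict.contains_eq_isSome_get?, hg]; rfl
        simp only [hc, Bool.not_true, Bool.false_or, Option.getD_some]
        by_cases hlt : v < w
        · simp [hlt, PySem.Dict.get?_insert_self]
        · simp [hlt, hg]
    · have hb : (s == k) = false := beq_eq_false_iff_ne.mpr hk
      simp only [List.filter_cons, hb, Bool.false_eq_true, if_false]
      congr 1
      rw [collapse_step_min]
      split
      · exact PySem.Dict.get?_insert_of_ne _ _ (fun h => hk h.symm)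
      · rfl

theorem combineRun_max_some (vs : List Int) (w : Int) :
    combineRun (fun w v => decide (w < v)) (some w) vs = some (vs.foldl max w) := by
  induction vs generalizing w with
  | nil => simp [combineRun]
  | cons v vs ih =>
    simp only [combineRun, List.foldl_cons, ih]
    congr 2
    simp only [decide_eq_true_eq, max_def]
    split <;> split <;> first | rfl | omega

theorem combineRun_min_some (vs : List Int) (w : Int) :
    combineRun (fun w v => decide (v < w)) (some w) vs = some (vs.foldl min w) := by
  induction vs generalizing w with
  | nil => simp [combineRun]
  | cons v vs ih =>
    simp only [combineRun, List.foldl_cons, ih]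
    congr 2
    simp only [decide_eq_true_eq, min_def]
    split <;> split <;> first | rfl | omega

theorem insert_keys_add (e : PySem.Dict String Int) (k : String) (v : Int) :
    (e.insert k v).keys = PySem.Set.add e.keys k := by
  by_cases hc : e.contains k = true
  · rw [PySem.Dict.keys_insert_of_contains _ _ hc, PySem.Set.add,
      if_pos (by simpa [PySem.Set.contains, PySem.Dict.contains_iff_mem_keys] using hc)]
  · have hc' : e.contains k = false := by simpa using hc
    rw [PySem.Dict.keys_insert_of_not_contains _ _ hc', PySem.Set.add,
      if_neg (by
        have : ¬ k ∈ e.keys := fun hmem =>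
          hc ((PySem.Dict.contains_iff_mem_keys e k).mpr hmem)
        simpa [PySem.Set.contains] using this)]

theorem set_add_of_contains (e : PySem.Dict String Int) (k : String) (hc : e.contains k = true) :
    PySem.Set.add e.keys k = e.keys := by
  rw [PySem.Set.add,
    if_pos (by simpa [PySem.Set.contains, PySem.Dict.contains_iff_mem_keys] using hc)]

theorem foldl_step_keys (mm : String) (hmm : mm = "max" ∨ mm = "min")
    (states : List (String × Int)) (d : PySem.Dict String Int) :
    (states.foldl (collapse_step mm) d).keys = PySem.Set.update d.keys (states.map (·.1)) := by
  induction states generalizing d with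
  | nil => simp [PySem.Set.update]
  | cons p rest ih =>
    rw [List.foldl_cons, ih, List.map_cons, PySem.Set.update_cons]
    congr 1
    unfold collapse_step
    split
    · split
      · exact insert_keys_add d p.1 p.2
      · rename_i h
        simp only [Bool.or_eq_true, Bool.not_eq_true', not_or] at h
        exact (set_add_of_contains d p.1 (by simpa using h.1)).symm
    · split
      · split
        · exact insert_keys_add d p.1 p.2
        · rename_i h
          simp only [Bool.or_eq_true, Bool.not_eq_true', not_or] at h
          exact (set_add_of_contains d p.1 (by simpa using h.1)).symm
      · rename_i h1 h2
        rcases hmm with hmm | hmm <;> simp [hmm] at h1 h2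

theorem foldl_step_other (mm : String) (h1 : (mm == "max") = false)
    (h2 : (mm == "min") = false) (states : List (String × Int)) (d : PySem.Dict String Int) :
    states.foldl (collapse_step mm) d = d := by
  induction states generalizing d with
  | nil => rfl
  | cons p rest ih =>
    rw [List.foldl_cons]
    have hstep : collapse_step mm d p = d := by unfold collapse_step; simp [h1, h2]
    rw [hstep, ih]

-- ===== VERDICT (by name: the statement is the Claim_ definition above) =====
theorem collapse_list_spec : Claim_equal_collapse_list := by
  intro states mm _
  unfold Spec_collapse_list collapse_list collapse_list_alt
  set dA := states.foldl (collapse_step mm) PySem.Dict.empty with hdA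
  set g := states.foldl (fun d p => d.modify p.1 [] (fun vs => vs ++ [p.2])) PySem.Dict.empty with hg
  have hkG : g.keys = PySem.Set.ofList (states.map (·.1)) := by
    have h := PySem.Dict.keys_foldl_modify_key (l := states) (key := fun p : String × Int => p.1)
      (d0 := ([] : List Int)) (f := fun _ p vs => vs ++ [p.2]) (d := PySem.Dict.empty)
    rw [hg]
    simpa [PySem.Dict.keys_empty, PySem.Set.update_nil_left] using h
  have hndG : g.keys.Nodup := by rw [hkG]; exact PySem.Set.nodup_ofList _
  have hGget : ∀ k, g.getD k [] = (states.filter (fun p => p.1 == k)).map (·.2) := by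
    intro k
    rw [hg, PySem.Dict.getD_foldl_modify_append]
    simp [PySem.Dict.getD_empty]
  have hItemsG := PySem.Dict.items_eq_map_keys g hndG []
  have hmem : ∀ k ∈ PySem.Set.ofList (states.map (·.1)),
      ∃ v vs, (states.filter (fun p => p.1 == k)).map (·.2) = v :: vs := by
    intro k hk
    have hk' : k ∈ states.map (·.1) := (PySem.Set.mem_ofList _ _).mp hk
    obtain ⟨p, hp, hpk⟩ := List.mem_map.mp hk'
    have hmemf : p ∈ states.filter (fun p => p.1 == k) :=
      List.mem_filter.mpr ⟨hp, by simp [hpk]⟩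
    have hne : states.filter (fun p => p.1 == k) ≠ [] := fun h => by simp [h] at hmemf
    rcases hcase : (states.filter (fun p => p.1 == k)).map (·.2) with _ | ⟨v, vs⟩
    · exact absurd (List.map_eq_nil_iff.mp hcase) hne
    · exact ⟨v, vs, hcase⟩
  by_cases hmax : mm = "max"
  · subst hmax
    have hkA : dA.keys = PySem.Set.ofList (states.map (·.1)) := by
      rw [hdA, foldl_step_keys _ (Or.inl rfl)]
      simp [PySem.Dict.keys_empty, PySem.Set.update_nil_left]
    have hndA : dA.keys.Nodup := by rw [hkA]; exact PySem.Set.nodup_ofList _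
    have hItemsA := PySem.Dict.items_eq_map_keys dA hndA 0
    rw [if_pos (by decide)]
    rw [hItemsA, hItemsG, List.map_map, hkA, hkG]
    refine List.map_congr_left ?_
    intro k hk
    obtain ⟨v, vs, hvs⟩ := hmem k hk
    have hget := foldl_stepMax_get? states PySem.Dict.empty k
    rw [PySem.Dict.get?_empty] at hget
    simp only [Function.comp]
    rw [PySem.Dict.getD_eq_get?_getD, hdA, hget, hGget k, hvs, combineRun,
      combineRun_max_some, PySem.List.max?_id_cons]
  · by_cases hmin : mm = "min"
    · subst hmin
      have hkA : dA.keys = PySem.Set.ofList (states.map (·.1)) := by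
        rw [hdA, foldl_step_keys _ (Or.inr rfl)]
        simp [PySem.Dict.keys_empty, PySem.Set.update_nil_left]
      have hndA : dA.keys.Nodup := by rw [hkA]; exact PySem.Set.nodup_ofList _
      have hItemsA := PySem.Dict.items_eq_map_keys dA hndA 0
      rw [if_neg (by decide), if_pos (by decide)]
      rw [hItemsA, hItemsG, List.map_map, hkA, hkG]
      refine List.map_congr_left ?_
      intro k hk
      obtain ⟨v, vs, hvs⟩ := hmem k hk
      have hget := foldl_stepMin_get? states PySem.Dict.empty k
      rw [PySem.Dict.get?_empty] at hget
      simp only [Function.comp]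
      rw [PySem.Dict.getD_eq_get?_getD, hdA, hget, hGget k, hvs, combineRun,
        combineRun_min_some, PySem.List.min?_id_cons]
    · have hb1 : (mm == "max") = false := beq_eq_false_iff_ne.mpr hmax
      have hb2 : (mm == "min") = false := beq_eq_false_iff_ne.mpr hmin
      rw [if_neg (by simp [hb1]), if_neg (by simp [hb2])]
      show dA.items = []
      rw [hdA, foldl_step_other mm hb1 hb2]
      rfl
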